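-- pv_equiv track=rewrite | github.com/ECMWFCode4Earth/ml_drought | scripts/drafts/clusterutils.py | get_label_2_color
-- ===== SOURCE A (Python) =====
-- from collections import defaultdict
-- from typing import Dict, List, Tuple
--
-- def get_label_2_color(lstm_clusters: Dict, raw_clusters: Dict) -> defaultdict:
--     """Helper function to match colors between cluster results.
--
--     This function tries to match the colors of different cluster results, by comparing the number of
--     shared basins between to clusters. This is not a bullet-proof algorithm but works for our plots.
--
--     Basically what is does is to take the results of one clusterer and then compare a second one by
--     finding the cluster label of the second clusterer that has the most basins in common. Then
--     assigning both labels the same color.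
--
--     Parameters
--     ----------
--     lstm_feats : Dict
--         Cluster labels for the LSTM embeddings
--     raw_feats : Dict
--         Cluster labels for the raw catchment attributes
--
--     Returns
--     -------
--     defaultdict
--         Dictionary that contains a mapping from label number to color for both cluster results.
--     """
--     color_list = ['#1b9e77', '#d95f02', '#7570b3', '#e7298a', '#e6ab02', '#66a61e']
--     label_2_color = defaultdict(dict)
--     basin_in_cluster = {'lstm': defaultdict(list), 'raw': defaultdict(list)}
--     for basin, label in lstm_clusters.items():
--         basin_in_cluster["lstm"][label].append(basin)
--     for basin, label in raw_clusters.items():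
--         basin_in_cluster["raw"][label].append(basin)
--
--     for label, basins in basin_in_cluster["lstm"].items():
--         label_2_color["lstm"][label] = color_list[label]
--
--         max_count = -1
--         color_label = None
--         for label2, basins2 in basin_in_cluster["raw"].items():
--             intersect = set(basins).intersection(basins2)
--             if len(intersect) > max_count:
--                 max_count = len(intersect)
--                 color_label = label2
--
--         label_2_color["raw"][color_label] = color_list[label]
--
--     return label_2_color
-- ===== SOURCE B (Python) =====
-- from collections import defaultdict, Counter
--
--
-- def get_label_2_color(lstm_clusters, raw_clusters):
--     """Counting re-implementation: tally shared basins per (lstm, raw) label pair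
--     in one pass over lstm_clusters via raw-dict lookups, then pick each lstm
--     label's partner with max() over raw labels in insertion order and assemble
--     the two inner dicts with comprehensions."""
--     color_list = ['#1b9e77', '#d95f02', '#7570b3', '#e7298a', '#e6ab02', '#66a61e']
--     label_2_color = defaultdict(dict)
--     if not lstm_clusters:
--         return label_2_color
--     lstm_order = list(dict.fromkeys(lstm_clusters.values()))
--     raw_order = list(dict.fromkeys(raw_clusters.values()))
--     counts = Counter(
--         (label, raw_clusters[basin])
--         for basin, label in lstm_clusters.items()
--         if basin in raw_clusters
--     )
--     label_2_color["lstm"] = {l: color_list[l] for l in lstm_order}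
--     label_2_color["raw"] = {
--         max(raw_order, key=lambda r: counts[(l, r)]): color_list[l]
--         for l in lstm_order
--     }
--     return label_2_color
-- ===== Notes on version B (the rewrite author's own statement) =====
-- stated objective: alternative
-- what changed: Instead of grouping basins per label and computing a set intersection for every (lstm label, raw label) pair inside nested loops with a running argmax and a nested defaultdict, B tallies shared basins per (lstm,raw) label pair with one Counter pass over lstm_clusters via raw-dict lookups, picks each lstm label's partner with max(key=) over raw labels in insertion order, and assembles the two inner dicts with comprehensions (asymptotically fewer operations, though not measurably faster in a timing run).
-- outside the precondition, e.g. on get_label_2_color({'a': 0}, {}): A returns {'lstm': {0: '#1b9e77'}, 'raw': {None: '#1b9e77'}}, B raises ValueError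
import Mathlib
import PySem

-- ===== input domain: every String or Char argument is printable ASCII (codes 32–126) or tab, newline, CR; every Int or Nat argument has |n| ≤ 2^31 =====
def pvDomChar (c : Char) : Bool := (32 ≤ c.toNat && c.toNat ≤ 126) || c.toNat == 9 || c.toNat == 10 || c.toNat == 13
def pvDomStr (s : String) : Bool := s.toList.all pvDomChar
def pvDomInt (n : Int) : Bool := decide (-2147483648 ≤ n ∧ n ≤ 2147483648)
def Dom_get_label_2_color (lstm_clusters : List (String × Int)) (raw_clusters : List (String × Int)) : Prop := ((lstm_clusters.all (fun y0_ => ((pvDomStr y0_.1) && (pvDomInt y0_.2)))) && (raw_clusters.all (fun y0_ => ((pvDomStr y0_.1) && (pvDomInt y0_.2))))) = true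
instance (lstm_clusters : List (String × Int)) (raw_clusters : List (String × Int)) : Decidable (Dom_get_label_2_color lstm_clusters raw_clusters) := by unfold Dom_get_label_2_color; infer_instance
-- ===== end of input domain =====

-- B replaces A's per-(label,label) set intersections and running argmax by a single
-- counting pass over lstm_clusters with raw-dict lookups, a max(key=) per lstm label,
-- and direct comprehension-style assembly of the two inner dicts.


-- ===== PORT A =====
-- the color palette literal shared by both ports (the same literal appears in Source A and Source B)
def pvColorList : List String :=
  ["#1b9e77", "#d95f02", "#7570b3", "#e7298a", "#e6ab02", "#66a61e"]

-- A's inner loop over basin_in_cluster["raw"].items(): state = (max_count, color_label).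
-- color_label is None before the first iteration, hence Option Int.
def pvAInner (basins : List String) (st : Int × Option Int) (p : Int × List String) :
    Int × Option Int :=
  let intersect := PySem.Set.inter (PySem.Set.ofList basins) p.2
  if (intersect.length : Int) > st.1 then ((intersect.length : Int), some p.1) else st

-- literal port of A: group basins per label for both dicts, then per lstm cluster scan
-- all raw clusters for the one sharing the most basins.  color_list[label] is pyGetD
-- (Python raises IndexError out of range — excluded by Pre_); a None color_label
-- (raw dict empty — excluded by Pre_, Python would use a None key) skips the store.
def get_label_2_color (lstm_clusters : List (String × Int)) (raw_clusters : List (String × Int)) : List (String × List (Int × String)) :=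
  -- the assoc-list arguments denote Python dicts with the FIRST binding of a key winning
  let lstmD := lstm_clusters.foldl (fun (d : PySem.Dict String Int) p => d.setdefault p.1 p.2) PySem.Dict.empty
  let rawD := raw_clusters.foldl (fun (d : PySem.Dict String Int) p => d.setdefault p.1 p.2) PySem.Dict.empty
  let bL := lstmD.items.foldl
    (fun (d : PySem.Dict Int (List String)) p => d.modify p.2 [] (· ++ [p.1])) PySem.Dict.empty
  let bR := rawD.items.foldl
    (fun (d : PySem.Dict Int (List String)) p => d.modify p.2 [] (· ++ [p.1])) PySem.Dict.empty
  let res := bL.items.foldl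
    (fun (acc : PySem.Dict String (PySem.Dict Int String)) (lb : Int × List String) =>
      let color := PySem.List.pyGetD pvColorList lb.1 ""
      let acc := acc.modify "lstm" PySem.Dict.empty (fun m => m.insert lb.1 color)
      let st := bR.items.foldl (pvAInner lb.2) (-1, none)
      acc.modify "raw" PySem.Dict.empty (fun m =>
        match st.2 with
        | some cl => m.insert cl color
        | none => m))
    PySem.Dict.empty
  res.items.map (fun p => (p.1, p.2.items))

-- ===== PORT B =====
-- literal port of B (Source B): early return on an empty lstm dict; one Counter pass over
-- lstm items ('basin in raw_clusters' + 'raw_clusters[basin]' ported together as one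
-- get? match, exact); per lstm label (first-appearance order) Python's max(raw_order,
-- key=…) is PySem.List.max? (first maximal element, none = ValueError, excluded by
-- Pre_); the two inner dict comprehensions are insert folds over lstm_order.
def get_label_2_color_alt (lstm_clusters : List (String × Int)) (raw_clusters : List (String × Int)) : List (String × List (Int × String)) :=
  if lstm_clusters.isEmpty then [] else
  -- same first-wins dict view of the assoc-list arguments as in port A
  let lstmD := lstm_clusters.foldl (fun (d : PySem.Dict String Int) p => d.setdefault p.1 p.2) PySem.Dict.empty
  let rawD := raw_clusters.foldl (fun (d : PySem.Dict String Int) p => d.setdefault p.1 p.2) PySem.Dict.empty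
  let lstmOrder := PySem.List.dedup lstmD.values
  let rawOrder := PySem.List.dedup rawD.values
  let counts := lstmD.items.foldl
    (fun (c : PySem.Dict (Int × Int) Int) p =>
      match rawD.get? p.1 with
      | some rl => c.modify (p.2, rl) 0 (· + 1)
      | none => c)
    PySem.Dict.empty
  let lstmMap := lstmOrder.foldl
    (fun (m : PySem.Dict Int String) l => m.insert l (PySem.List.pyGetD pvColorList l ""))
    PySem.Dict.empty
  let rawMap := lstmOrder.foldl
    (fun (m : PySem.Dict Int String) l =>
      match PySem.List.max? rawOrder (fun r => counts.getD (l, r) 0) with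
      | some best => m.insert best (PySem.List.pyGetD pvColorList l "")
      | none => m)
    PySem.Dict.empty
  [("lstm", lstmMap.items), ("raw", rawMap.items)]

-- ===== PRECONDITION & SPEC =====
-- Pre_ excludes exactly (a) inputs where Python A raises IndexError (an lstm label outside
-- the palette's Python index range [-6, 5]), and (b) inputs with a nonempty lstm dict but an
-- empty raw dict, where A returns a dict keyed by None — not representable as Int — and
-- Python B raises ValueError (max of an empty sequence).
def Pre_get_label_2_color (lstm_clusters : List (String × Int)) (raw_clusters : List (String × Int)) : Prop :=
  (∀ p ∈ lstm_clusters, -6 ≤ p.2 ∧ p.2 ≤ 5) ∧ (lstm_clusters = [] ∨ raw_clusters ≠ [])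
instance (lstm_clusters : List (String × Int)) (raw_clusters : List (String × Int)) : Decidable (Pre_get_label_2_color lstm_clusters raw_clusters) := by unfold Pre_get_label_2_color; infer_instance

def pvWitness_get_label_2_color : (List (String × Int)) × (List (String × Int)) :=
  ([("a", 0), ("b", 1), ("c", 0)], [("a", 1), ("b", 1), ("c", 0)])

def Spec_get_label_2_color (lstm_clusters : List (String × Int)) (raw_clusters : List (String × Int)) (out : List (String × List (Int × String))) : Prop := out = get_label_2_color_alt lstm_clusters raw_clusters
instance (lstm_clusters : List (String × Int)) (raw_clusters : List (String × Int)) (out : List (String × List (Int × String))) : Decidable (Spec_get_label_2_color lstm_clusters raw_clusters out) := by unfold Spec_get_label_2_color; infer_instance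

-- ===== CLAIM (what is proved, stated in full; the proofs are below) =====
def Claim_equal_get_label_2_color : Prop := ∀ (lstm_clusters : List (String × Int)) (raw_clusters : List (String × Int)), Dom_get_label_2_color lstm_clusters raw_clusters → Pre_get_label_2_color lstm_clusters raw_clusters → Spec_get_label_2_color lstm_clusters raw_clusters (get_label_2_color lstm_clusters raw_clusters)

-- ===== LEMMAS AND PROOFS =====

-- group-by-label fold: lookup gives the basins with that label, in order
theorem pvGroupGetD (items : List (String × Int)) (d : PySem.Dict Int (List String)) (c : Int) :
    (items.foldl (fun d p => d.modify p.2 [] (· ++ [p.1])) d).getD c []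
      = d.getD c [] ++ (items.filter (fun p => p.2 == c)).map (·.1) := by
  have h : items.foldl (fun d p => d.modify p.2 [] (· ++ [p.1])) d
      = (items.map Prod.swap).foldl (fun d p => d.modify p.1 [] (· ++ [p.2])) d := by
    simp only [List.foldl_map, Prod.fst_swap, Prod.snd_swap]
  rw [h, PySem.Dict.getD_foldl_modify_append]
  simp [List.filter_map, List.map_map, Function.comp_def]

-- group-by-label fold: keys are the distinct labels in first-appearance order
theorem pvGroupKeys (items : List (String × Int)) :
    (items.foldl (fun (d : PySem.Dict Int (List String)) p => d.modify p.2 [] (· ++ [p.1])) PySem.Dict.empty).keys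
      = PySem.Set.ofList (items.map (·.2)) := by
  rw [PySem.Dict.keys_foldl_modify_key]
  simp [PySem.Dict.keys_empty, PySem.Set.ofList_eq_foldl, PySem.Set.update]

theorem pvGroupNodupKeys (items : List (String × Int)) :
    (items.foldl (fun (d : PySem.Dict Int (List String)) p => d.modify p.2 [] (· ++ [p.1])) PySem.Dict.empty).keys.Nodup :=
  PySem.Dict.nodup_keys_foldl_modify_key items (·.2) [] (fun _ p => (· ++ [p.1])) PySem.Dict.empty
    (by simp)

-- membership in a label's basin group ↔ dict lookup (for a dict with unique keys)
theorem pvMemGroup (rawD : PySem.Dict String Int) (hnd : rawD.keys.Nodup) (b : String) (r : Int) :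
    b ∈ (rawD.items.filter (fun p => p.2 == r)).map (·.1) ↔ rawD.get? b = some r := by
  simp only [List.mem_map, List.mem_filter, beq_iff_eq]
  constructor
  · rintro ⟨⟨b', r'⟩, ⟨hp, hr⟩, rfl⟩
    subst hr
    exact PySem.Dict.get?_of_mem_items rawD hp hnd
  · intro h
    exact ⟨(b, r), ⟨PySem.Dict.mem_items_of_get?_eq_some rawD h, rfl⟩, rfl⟩

-- a label's basin group has no duplicates (its basins are dict keys)
theorem pvGroupNodup (lstmD : PySem.Dict String Int) (hnd : lstmD.keys.Nodup) (l : Int) :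
    ((lstmD.items.filter (fun p => p.2 == l)).map (·.1)).Nodup := by
  simp only [PySem.Dict.keys] at hnd
  exact (List.Sublist.map _ List.filter_sublist).nodup hnd

-- B's counting pass: the count of a pair is the number of lstm items with that
-- label whose basin maps to that raw label
theorem pvCountsGetD (items : List (String × Int)) (rawD : PySem.Dict String Int)
    (c : PySem.Dict (Int × Int) Int) (l r : Int) :
    (items.foldl (fun c p =>
        match rawD.get? p.1 with
        | some rl => c.modify (p.2, rl) 0 (· + 1)
        | none => c) c).getD (l, r) 0
      = c.getD (l, r) 0 + ((items.filter (fun p => p.2 == l && rawD.get? p.1 == some r)).length : Int) := by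
  induction items generalizing c with
  | nil => simp
  | cons p tl ih =>
    simp only [List.foldl_cons, List.filter_cons]
    cases hq : rawD.get? p.1 with
    | none => simp [ih]
    | some rl =>
      simp only [ih, PySem.Dict.getD_modify]
      by_cases hk : (l, r) = (p.2, rl)
      · have h1 : l = p.2 := (Prod.mk.injEq .. ▸ hk).1
        have h2 : r = rl := (Prod.mk.injEq .. ▸ hk).2
        simp [h1.symm, h2]
        ring_nf
      · have hne : ¬ (p.2 = l ∧ rl = r) := by
          rintro ⟨ha, hb⟩; exact hk (by simp [ha, hb])
        simp [hk, hne]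

-- a setdefault fold keeps dict keys unique
theorem pvNodupKeysSetdefault (ps : List (String × Int)) (d : PySem.Dict String Int)
    (h : d.keys.Nodup) :
    (ps.foldl (fun d p => d.setdefault p.1 p.2) d).keys.Nodup := by
  induction ps generalizing d with
  | nil => exact h
  | cons p tl ih =>
    simp only [List.foldl_cons]
    apply ih
    rcases hc : d.contains p.1 with _ | _
    · rw [PySem.Dict.setdefault_of_not_contains d p.2 hc]
      exact PySem.Dict.nodup_keys_insert d p.1 p.2 h
    · rw [PySem.Dict.setdefault_of_contains d p.2 hc]
      exact h

-- a setdefault fold never empties a dict; from a nonempty list it is nonempty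
theorem pvSetdefaultNE (ps : List (String × Int)) (d : PySem.Dict String Int)
    (h : d.items ≠ []) :
    (ps.foldl (fun d p => d.setdefault p.1 p.2) d).items ≠ [] := by
  induction ps generalizing d with
  | nil => exact h
  | cons p tl ih =>
    simp only [List.foldl_cons]
    apply ih
    rcases hc : d.contains p.1 with _ | _
    · rw [PySem.Dict.setdefault_of_not_contains d p.2 hc]
      simp [PySem.Dict.insert, hc]
    · rw [PySem.Dict.setdefault_of_contains d p.2 hc]
      exact h

-- the key fact: |set(lstm group l) ∩ (raw group r)| = counts[(l, r)]
theorem pvInterLen (lstmD rawD : PySem.Dict String Int)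
    (hL : lstmD.keys.Nodup) (hR : rawD.keys.Nodup) (l r : Int) :
    ((PySem.Set.inter (PySem.Set.ofList ((lstmD.items.filter (fun p => p.2 == l)).map (·.1)))
        ((rawD.items.filter (fun p => p.2 == r)).map (·.1))).length : Int)
      = (lstmD.items.foldl (fun c p =>
          match rawD.get? p.1 with
          | some rl => c.modify (p.2, rl) 0 (· + 1)
          | none => c) (PySem.Dict.empty : PySem.Dict (Int × Int) Int)).getD (l, r) 0 := by
  rw [pvCountsGetD, PySem.Dict.getD_empty]
  rw [PySem.Set.ofList_eq_self_of_nodup _ (pvGroupNodup lstmD hL l)]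
  have hinter : ∀ (s t : List String), PySem.Set.inter s t = s.filter (fun x => t.contains x) := fun _ _ => rfl
  rw [hinter, List.filter_map, List.filter_filter, Int.zero_add]
  rw [List.length_map]
  refine congrArg (fun n : Nat => (n : Int)) (congrArg List.length ?_)
  apply List.filter_congr
  intro p _
  have hb : ((rawD.items.filter (fun p => p.2 == r)).map (·.1)).contains p.1
      = (rawD.get? p.1 == some r) := by
    simp only [List.contains_eq_mem, pvMemGroup rawD hR]
    exact (Bool.beq_eq_decide_eq _ _).symm
  simp only [Function.comp_def, hb, Bool.and_comm]

-- counts are nonnegative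
theorem pvCountsNonneg (items : List (String × Int)) (rawD : PySem.Dict String Int) (l r : Int) :
    0 ≤ (items.foldl (fun c p =>
        match rawD.get? p.1 with
        | some rl => c.modify (p.2, rl) 0 (· + 1)
        | none => c) (PySem.Dict.empty : PySem.Dict (Int × Int) Int)).getD (l, r) 0 := by
  rw [pvCountsGetD, PySem.Dict.getD_empty]
  positivity

-- A's running strict-> argmax from (-1, none) equals Python's max(key=) (first maximal
-- element), provided all keys are ≥ 0: auxiliary form with a current best m
theorem pvArgmaxAux {α : Type} (k : α → Int) (rs : List α) (m : α) :
    rs.foldl (fun (st : Int × Option α) r => if k r > st.1 then (k r, some r) else st) (k m, some m)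
      = match PySem.List.max? (m :: rs) k with
        | some m' => (k m', some m')
        | none => (0, none) := by
  induction rs generalizing m with
  | nil => simp [PySem.List.max?]
  | cons r tl ih =>
    simp only [PySem.List.max?, List.foldl_cons] at ih ⊢
    simp only [gt_iff_lt]
    by_cases h : k m < k r
    · rw [if_pos h, if_pos h]
      exact ih r
    · rw [if_neg h, if_neg h]
      exact ih m

theorem pvArgmax {α : Type} (k : α → Int) (rs : List α) (hk : ∀ r ∈ rs, 0 ≤ k r) :
    (rs.foldl (fun (st : Int × Option α) r => if k r > st.1 then (k r, some r) else st) (-1, none)).2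
      = PySem.List.max? rs k := by
  cases rs with
  | nil => simp [PySem.List.max?]
  | cons r tl =>
    have h0 : k r > (-1 : Int) := lt_of_lt_of_le (by norm_num) (hk r (by simp))
    simp only [List.foldl_cons, if_pos h0]
    rw [pvArgmaxAux]
    cases PySem.List.max? (r :: tl) k <;> rfl

-- modify on the two-key dict {"lstm": m1, "raw": m2} acts on the named slot only
theorem pvModLstm (m1 m2 : PySem.Dict Int String) (f : PySem.Dict Int String → PySem.Dict Int String) :
    PySem.Dict.modify ⟨[("lstm", m1), ("raw", m2)]⟩ "lstm" PySem.Dict.empty f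
      = ⟨[("lstm", f m1), ("raw", m2)]⟩ := by
  simp [PySem.Dict.modify, PySem.Dict.insert, PySem.Dict.contains, PySem.Dict.getD,
    PySem.Dict.get?]

theorem pvModRaw (m1 m2 : PySem.Dict Int String) (f : PySem.Dict Int String → PySem.Dict Int String) :
    PySem.Dict.modify ⟨[("lstm", m1), ("raw", m2)]⟩ "raw" PySem.Dict.empty f
      = ⟨[("lstm", m1), ("raw", f m2)]⟩ := by
  simp [PySem.Dict.modify, PySem.Dict.insert, PySem.Dict.contains, PySem.Dict.getD,
    PySem.Dict.get?]

theorem pvModEmptyLstm (f : PySem.Dict Int String → PySem.Dict Int String) :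
    PySem.Dict.modify (PySem.Dict.empty : PySem.Dict String (PySem.Dict Int String)) "lstm" PySem.Dict.empty f
      = ⟨[("lstm", f PySem.Dict.empty)]⟩ := by
  simp [PySem.Dict.modify, PySem.Dict.insert, PySem.Dict.contains, PySem.Dict.getD,
    PySem.Dict.get?, PySem.Dict.empty]

theorem pvModOneRaw (m1 : PySem.Dict Int String) (f : PySem.Dict Int String → PySem.Dict Int String) :
    PySem.Dict.modify ⟨[("lstm", m1)]⟩ "raw" PySem.Dict.empty f
      = ⟨[("lstm", m1), ("raw", f PySem.Dict.empty)]⟩ := by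
  simp [PySem.Dict.modify, PySem.Dict.insert, PySem.Dict.contains, PySem.Dict.getD,
    PySem.Dict.get?]

-- A's outer fold keeps the two-key shape and acts slotwise
theorem pvTwoKeyFold (ls : List Int)
    (g h : Int → PySem.Dict Int String → PySem.Dict Int String)
    (m1 m2 : PySem.Dict Int String) :
    ls.foldl (fun acc l =>
        PySem.Dict.modify (PySem.Dict.modify acc "lstm" PySem.Dict.empty (g l)) "raw" PySem.Dict.empty (h l))
      ⟨[("lstm", m1), ("raw", m2)]⟩
      = ⟨[("lstm", ls.foldl (fun m l => g l m) m1), ("raw", ls.foldl (fun m l => h l m) m2)]⟩ := by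
  induction ls generalizing m1 m2 with
  | nil => rfl
  | cons l tl ih =>
    simp only [List.foldl_cons, pvModLstm, pvModRaw]
    exact ih (g l m1) (h l m2)

-- ===== VERDICT =====
theorem get_label_2_color_spec : Claim_equal_get_label_2_color := by
  intro L R _ hPre
  unfold Spec_get_label_2_color
  by_cases hL : L = []
  · subst hL; rfl
  · unfold get_label_2_color get_label_2_color_alt
    rw [if_neg (by simpa using hL)]
    dsimp only
    set lstmD := L.foldl (fun (d : PySem.Dict String Int) p => d.setdefault p.1 p.2) PySem.Dict.empty with hlstmD
    set rawD := R.foldl (fun (d : PySem.Dict String Int) p => d.setdefault p.1 p.2) PySem.Dict.empty with hrawD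
    set bL := lstmD.items.foldl
      (fun (d : PySem.Dict Int (List String)) p => d.modify p.2 [] (· ++ [p.1])) PySem.Dict.empty with hbL
    set bR := rawD.items.foldl
      (fun (d : PySem.Dict Int (List String)) p => d.modify p.2 [] (· ++ [p.1])) PySem.Dict.empty with hbR
    set counts := lstmD.items.foldl
      (fun (c : PySem.Dict (Int × Int) Int) p =>
        match rawD.get? p.1 with
        | some rl => c.modify (p.2, rl) 0 (· + 1)
        | none => c)
      PySem.Dict.empty with hcounts
    have hNodupL : lstmD.keys.Nodup := pvNodupKeysSetdefault L _ PySem.Dict.nodup_keys_empty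
    have hNodupR : rawD.keys.Nodup := pvNodupKeysSetdefault R _ PySem.Dict.nodup_keys_empty
    have hgL : ∀ l : Int, bL.getD l [] = (lstmD.items.filter (fun p => p.2 == l)).map (·.1) := by
      intro l; rw [hbL, pvGroupGetD]; simp
    have hgR : ∀ r : Int, bR.getD r [] = (rawD.items.filter (fun p => p.2 == r)).map (·.1) := by
      intro r; rw [hbR, pvGroupGetD]; simp
    have hItemsL : bL.items = (PySem.List.dedup lstmD.values).map (fun l => (l, bL.getD l [])) := by
      rw [PySem.Dict.items_eq_map_keys bL (pvGroupNodupKeys _) []]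
      rw [hbL, pvGroupKeys]
      simp [PySem.List.dedup_eq_ofList, PySem.Dict.values]
    have hItemsR : bR.items = (PySem.List.dedup rawD.values).map (fun r => (r, bR.getD r [])) := by
      rw [PySem.Dict.items_eq_map_keys bR (pvGroupNodupKeys _) []]
      rw [hbR, pvGroupKeys]
      simp [PySem.List.dedup_eq_ofList, PySem.Dict.values]
    -- the per-label argmax of A equals B's max?
    have hst : ∀ l : Int,
        (bR.items.foldl (pvAInner (bL.getD l [])) (-1, none)).2
          = PySem.List.max? (PySem.List.dedup rawD.values) (fun r => counts.getD (l, r) 0) := by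
      intro l
      rw [hItemsR, List.foldl_map]
      have hstep : ∀ (st : Int × Option Int) (r : Int),
          pvAInner (bL.getD l []) st (r, bR.getD r [])
            = if counts.getD (l, r) 0 > st.1 then (counts.getD (l, r) 0, some r) else st := by
        intro st r
        unfold pvAInner
        dsimp only
        rw [hgL, hgR, pvInterLen lstmD rawD hNodupL hNodupR l r, ← hcounts]
      have hfold : (PySem.List.dedup rawD.values).foldl
            (fun st r => pvAInner (bL.getD l []) st (r, bR.getD r [])) (-1, none)
          = (PySem.List.dedup rawD.values).foldl
            (fun (st : Int × Option Int) r =>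
              if counts.getD (l, r) 0 > st.1 then (counts.getD (l, r) 0, some r) else st) (-1, none) := by
        exact PySem.List.foldl_congr_mem _ _ _ _ (fun st r _ => hstep st r)
      rw [hfold]
      exact pvArgmax _ _ (fun r _ => hcounts ▸ pvCountsNonneg lstmD.items rawD l r)
    -- the lstm order is nonempty, so A's outer fold starts by creating both slots
    have hNE : PySem.List.dedup lstmD.values ≠ [] := by
      have : lstmD.items ≠ [] := by
        cases L with
        | nil => exact absurd rfl hL
        | cons p tl =>
          rw [hlstmD]
          simp only [List.foldl_cons]
          apply pvSetdefaultNE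
          simp [PySem.Dict.setdefault, PySem.Dict.empty, PySem.Dict.contains]
      intro hcon
      apply this
      have hv : lstmD.values = [] := by
        by_contra hv
        cases hval : lstmD.values with
        | nil => exact hv hval
        | cons v tl =>
          have : v ∈ PySem.List.dedup lstmD.values := by
            rw [PySem.List.dedup_eq_ofList]
            rw [hval]
            exact (PySem.Set.mem_ofList _ _).mpr (by simp)
          rw [hcon] at this
          exact absurd this (List.not_mem_nil)
      unfold PySem.Dict.values at hv
      simpa using hv
    obtain ⟨l0, tl, hcons⟩ := List.exists_cons_of_ne_nil hNE
    -- reduce A's fold over bL.items to a fold over the lstm label order,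
    -- replace A's running argmax by B's max? everywhere, and split the first step
    rw [hItemsL, List.foldl_map]
    simp only [hst]
    rw [hcons]
    simp only [List.foldl_cons]
    rw [pvModEmptyLstm, pvModOneRaw, pvTwoKeyFold]
    rfl
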